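-- pv_equiv track=rewrite | github.com/wasdw1012/RSA-LLL-2.0 | k_theory_spectral_seq.py | _finite_field_order_prime_power_u64
-- ===== SOURCE A (Python) =====
-- from typing import List, Dict, Tuple, Optional, Set, Callable, Any, Sequence
--
-- def _is_prime_u64_deterministic(n: int) -> bool:
--     """
--     64-bit 范围内的确定性 Miller–Rabin 素性判定。
--
--     对 n < 2^64，底数集
--         [2, 325, 9375, 28178, 450775, 9780504, 1795265022]
--     是确定性的（非概率，非启发式）。
--     """
--     if not isinstance(n, int):
--         raise TypeError("n must be int.")
--     if n < 2:
--         return False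
--     if n in (2, 3):
--         return True
--     if n % 2 == 0:
--         return False
--     if n >= (1 << 64):
--         raise NotImplementedError("Deterministic primality check currently implemented only for n < 2^64.")
--
--     # n-1 = d * 2^s
--     d = n - 1
--     s = 0
--     while d % 2 == 0:
--         s += 1
--         d //= 2
--
--     bases = (2, 325, 9375, 28178, 450775, 9780504, 1795265022)
--     for a in bases:
--         if a >= n:
--             continue
--         x = pow(a, d, n)
--         if x == 1 or x == n - 1:
--             continue
--         witness = True
--         for _ in range(s - 1):
--             x = (x * x) % n
--             if x == n - 1:
--                 witness = False
--                 break
--         if witness: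
--             return False
--     return True
--
-- def _int_nth_root_floor(n: int, k: int) -> int:
--     """返回 ⌊n^{1/k}⌋（仅整数运算，确定性）。"""
--     if not isinstance(n, int) or n < 0:
--         raise ValueError("n must be a non-negative int.")
--     if not isinstance(k, int) or k <= 0:
--         raise ValueError("k must be a positive int.")
--     if n in (0, 1):
--         return n
--     if k == 1:
--         return n
--
--     # 上界：2^{ceil(bitlen/k)} 一定 >= n^{1/k}
--     bitlen = n.bit_length()
--     hi = 1 << ((bitlen + k - 1) // k)
--     lo = 1
--     while lo < hi:
--         mid = (lo + hi + 1) // 2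
--         mid_pow = pow(mid, k)
--         if mid_pow <= n:
--             lo = mid
--         else:
--             hi = mid - 1
--     return lo
--
-- def _finite_field_order_prime_power_u64(q: int) -> Tuple[int, int]:
--     """
--     将 q 分解为 q = p^f（p 为素数，f>=1）。
--
--     严格约束：
--     - 仅支持 q < 2^64（保证素性判定可确定性完成）。
--     - 若不是素数幂，抛异常（不做任何“近似域”降级）。
--     """
--     if not isinstance(q, int) or q < 2:
--         raise ValueError("q must be int >= 2.")
--     if q >= (1 << 64):
--         raise NotImplementedError("Finite field order decomposition currently implemented only for q < 2^64.")
--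
--     # f 的上界：2^f <= q ⇒ f <= floor(log2 q) = bit_length-1
--     max_f = q.bit_length() - 1
--     # 从大到小找最大 f，确保分解唯一（p 必须是素数）
--     for f in range(max_f, 0, -1):
--         p = _int_nth_root_floor(q, f)
--         if pow(p, f) != q:
--             continue
--         if _is_prime_u64_deterministic(p):
--             return p, f
--     raise ValueError("q is not a prime power with prime base within the supported 64-bit backend.")
-- ===== SOURCE B (Python) =====
-- from typing import Tuple
--
-- def _is_prime_u64_deterministic(n: int) -> bool:
--     """
--     64-bit 范围内的确定性 Miller–Rabin 素性判定。
--
--     对 n < 2^64，底数集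
--         [2, 325, 9375, 28178, 450775, 9780504, 1795265022]
--     是确定性的（非概率，非启发式）。
--     """
--     if not isinstance(n, int):
--         raise TypeError("n must be int.")
--     if n < 2:
--         return False
--     if n in (2, 3):
--         return True
--     if n % 2 == 0:
--         return False
--     if n >= (1 << 64):
--         raise NotImplementedError("Deterministic primality check currently implemented only for n < 2^64.")
--
--     d = n - 1
--     s = 0
--     while d % 2 == 0:
--         s += 1
--         d //= 2
--
--     bases = (2, 325, 9375, 28178, 450775, 9780504, 1795265022)
--     for a in bases:
--         if a >= n:
--             continue
--         x = pow(a, d, n)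
--         if x == 1 or x == n - 1:
--             continue
--         witness = True
--         for _ in range(s - 1):
--             x = (x * x) % n
--             if x == n - 1:
--                 witness = False
--                 break
--         if witness:
--             return False
--     return True
--
--
-- def _finite_field_order_prime_power_u64(q: int) -> Tuple[int, int]:
--     """Decompose q = p^f by full trial-division factorization: the exponent f is the
--     largest divisor of the gcd of the prime exponents whose corresponding root passes
--     the module's deterministic primality test (the same helper A uses)."""
--     if not isinstance(q, int) or q < 2:
--         raise ValueError("q must be int >= 2.")
--     if q >= (1 << 64):
--         raise NotImplementedError("Finite field order decomposition currently implemented only for q < 2^64.")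
--
--     # full factorization of q by trial division
--     factors = []
--     m = q
--     d = 2
--     while d * d <= m:
--         if m % d == 0:
--             e = 0
--             while m % d == 0:
--                 m //= d
--                 e += 1
--             factors.append((d, e))
--         d += 1 if d == 2 else 2
--     if m > 1:
--         factors.append((m, 1))
--
--     # gcd of the exponents: q is a perfect f-th power exactly when f divides g
--     g = 0
--     for _, e in factors:
--         a, b = g, e
--         while b:
--             a, b = b, a % b
--         g = a
--
--     for f in range(g, 0, -1):
--         if g % f != 0:
--             continue
--         p = 1
--         for (pr, e) in factors:
--             p *= pr ** (e // f)
--         if _is_prime_u64_deterministic(p):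
--             return p, f
--     raise ValueError("q is not a prime power with prime base within the supported 64-bit backend.")
-- ===== Notes on version B (the rewrite author's own statement) =====
-- stated objective: alternative
-- what changed: A searches exponents f downward, extracting an integer f-th root by binary search for every f and primality-testing it; B instead fully factors q by trial division, takes the gcd g of the prime exponents (q is a perfect f-th power iff f | g), and scans the divisors of g downward, primality-testing each reconstructed root with the module's same deterministic Miller-Rabin helper.
-- outside the precondition, e.g. on _finite_field_order_prime_power_u64(4033): A returns (4033, 1), B returns (4033, 1); on _finite_field_order_prime_power_u64(12): A raises ValueError, B raises ValueError; on _finite_field_order_prime_power_u64(1): A raises ValueError, B raises ValueError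
import Mathlib
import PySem

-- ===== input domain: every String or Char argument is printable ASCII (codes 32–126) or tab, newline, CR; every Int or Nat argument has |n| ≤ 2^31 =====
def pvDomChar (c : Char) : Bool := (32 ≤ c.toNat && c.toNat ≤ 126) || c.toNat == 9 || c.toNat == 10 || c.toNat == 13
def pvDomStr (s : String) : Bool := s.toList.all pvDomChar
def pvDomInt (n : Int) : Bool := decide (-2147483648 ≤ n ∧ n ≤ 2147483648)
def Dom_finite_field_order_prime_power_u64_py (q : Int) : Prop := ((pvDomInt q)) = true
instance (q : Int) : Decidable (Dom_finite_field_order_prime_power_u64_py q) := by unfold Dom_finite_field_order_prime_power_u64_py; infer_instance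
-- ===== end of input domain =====

-- B replaces A's descending perfect-root search (integer k-th roots by binary search, primality
-- test on each candidate) by a full trial-division factorization plus a scan over the divisors of
-- the gcd of the exponents, reusing the module's deterministic Miller–Rabin helper unchanged
-- (objective: alternative; not faster).

-- ===== PORT A =====
-- while d % 2 == 0: s += 1; d //= 2   (the '0 < d' guard only makes the recursion total;
-- the caller always passes d = n - 1 ≥ 4)
def pvSplit2 : Nat → Int → Int → Int × Int
  | 0, d, s => (d, s)
  | fuel + 1, d, s =>
    if PySem.Int.mod d 2 = 0 then pvSplit2 fuel (PySem.Int.floordiv d 2) (s + 1) else (d, s)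

-- the inner 'for _ in range(s - 1)' witness loop of _is_prime_u64_deterministic
def pvWitnessLoop (n x : Int) : Nat → Bool
  | 0 => true
  | Nat.succ k =>
    let x' := PySem.Int.mod (x * x) n
    if x' = n - 1 then false else pvWitnessLoop n x' k

-- pow(a, d, n): Python's three-argument built-in pow, ported as the square-and-multiply
-- modular exponentiation CPython itself performs (value-equal to (a^d) mod n, proved below)
def pvPowMod (b : Int) (e : Nat) (m : Int) : Int :=
  if h : e = 0 then PySem.Int.mod 1 m
  else
    let r := pvPowMod (PySem.Int.mod (b * b) m) (e / 2) m
    if e % 2 = 1 then PySem.Int.mod (r * b) m else r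
termination_by e
decreasing_by omega

-- the 'for a in bases' loop of _is_prime_u64_deterministic
def pvBasesLoop (n d s : Int) : List Int → Bool
  | [] => true
  | a :: rest =>
    if n ≤ a then pvBasesLoop n d s rest
    else
      let x := pvPowMod a d.toNat n
      if x = 1 ∨ x = n - 1 then pvBasesLoop n d s rest
      else if pvWitnessLoop n x (s - 1).toNat then false
      else pvBasesLoop n d s rest

-- port of _is_prime_u64_deterministic (a module helper both A and B call verbatim); its TypeError
-- branch cannot fire (n is an int) and the NotImplementedError branch (n ≥ 2^64) is unreachable
-- from either entry point on Dom (n ≤ q ≤ 2^31)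
def pvIsPrime (n : Int) : Bool :=
  if n < 2 then false
  else if n = 2 ∨ n = 3 then true
  else if PySem.Int.mod n 2 = 0 then false
  else
    let ds := pvSplit2 (n - 1).toNat (n - 1) 0
    pvBasesLoop n ds.1 ds.2 [2, 325, 9375, 28178, 450775, 9780504, 1795265022]

-- the 'while lo < hi' binary search of _int_nth_root_floor
def pvRootLoop : Nat → Int → Int → Int → Int → Int
  | 0, _, _, lo, _ => lo
  | fuel + 1, n, k, lo, hi =>
    if lo < hi then
      let mid := PySem.Int.floordiv (lo + hi + 1) 2
      if mid ^ k.toNat ≤ n then pvRootLoop fuel n k mid hi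
      else pvRootLoop fuel n k lo (mid - 1)
    else lo

-- port of _int_nth_root_floor; its two ValueError branches (n < 0 / k ≤ 0) are unreachable from
-- the entry point (it always passes n = q ≥ 2 and k ≥ 1)
def pvNthRootFloor (n k : Int) : Int :=
  if n = 0 ∨ n = 1 then n
  else if k = 1 then n
  else
    let bitlen : Int := (PySem.Int.bitLength n : Int)
    let hi : Int := (1 : Int) <<< (PySem.Int.floordiv (bitlen + k - 1) k).toNat
    pvRootLoop (hi.toNat + 1) n k 1 hi

-- the 'for f in range(max_f, 0, -1)' loop; [] reaching the final raise ValueError is outside Pre_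
def pvMainLoopA (q : Int) : List Int → Int × Int
  | [] => (0, 0)
  | f :: rest =>
    let p := pvNthRootFloor q f
    if p ^ f.toNat ≠ q then pvMainLoopA q rest
    else if pvIsPrime p then (p, f)
    else pvMainLoopA q rest

-- the ValueError branches of A (q < 2; not a prime power with an accepted base) are outside Pre_
-- (port returns (0,0) there); the NotImplementedError branch (q ≥ 2^64) cannot fire on Dom
def finite_field_order_prime_power_u64_py (q : Int) : Int × Int :=
  if q < 2 then (0, 0)
  else
    let max_f : Int := (PySem.Int.bitLength q : Int) - 1
    pvMainLoopA q (PySem.List.pyRange max_f 0 (-1))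

-- ===== PORT B =====
-- the inner 'while m % d == 0: m //= d; e += 1' loop of B's factorization; the '1 < d ∧ 0 < m'
-- guard only makes the recursion total (the caller always has d ≥ 2 and m ≥ 1 while it holds)
def pvDivOut : Nat → Int → Int → Int → Int × Int
  | 0, _, m, e => (m, e)
  | fuel + 1, d, m, e =>
    if PySem.Int.mod m d = 0 then pvDivOut fuel d (PySem.Int.floordiv m d) (e + 1) else (m, e)

-- the outer 'while d * d <= m' trial-division loop of B, collecting (prime, exponent) pairs and
-- returning the remaining cofactor; d steps 2, 3, 5, 7, … ('d += 1 if d == 2 else 2')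
def pvFactOuter : Nat → Int → Int → List (Int × Int) → List (Int × Int) × Int
  | 0, m, _, acc => (acc, m)
  | fuel + 1, m, d, acc =>
    if d * d ≤ m then
      if PySem.Int.mod m d = 0 then
        let r := pvDivOut m.toNat d m 0
        pvFactOuter fuel r.1 (if d = 2 then d + 1 else d + 2) (acc ++ [(d, r.2)])
      else pvFactOuter fuel m (if d = 2 then d + 1 else d + 2) acc
    else (acc, m)

-- the inner Euclid 'while b: a, b = b, a % b' of B's gcd; the '0 < b' guard (Python tests b ≠ 0)
-- only makes the recursion total: b is always a nonnegative exponent or remainder here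
def pvGcdE : Nat → Int → Int → Int
  | 0, a, _ => a
  | fuel + 1, a, b => if 0 < b then pvGcdE fuel b (PySem.Int.mod a b) else a

-- 'g = 0; for _, e in factors: g = gcd(g, e)'
def pvGcdFold (factors : List (Int × Int)) : Int :=
  factors.foldl (fun g pe => pvGcdE (pe.2.toNat + 1) g pe.2) 0

-- 'p = 1; for (pr, e) in factors: p *= pr ** (e // f)'
def pvRootProd (factors : List (Int × Int)) (f : Int) : Int :=
  factors.foldl (fun acc pe => acc * pe.1 ^ (PySem.Int.floordiv pe.2 f).toNat) 1

-- the 'for f in range(g, 0, -1)' divisor scan of B; [] reaching the raise ValueError is outside Pre_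
def pvMainLoopB (g : Int) (factors : List (Int × Int)) : List Int → Int × Int
  | [] => (0, 0)
  | f :: rest =>
    if PySem.Int.mod g f ≠ 0 then pvMainLoopB g factors rest
    else
      let p := pvRootProd factors f
      if pvIsPrime p then (p, f) else pvMainLoopB g factors rest

-- the ValueError branches of B (q < 2; no divisor of g gives an accepted root) are outside Pre_
-- (port returns (0,0) there); NotImplementedError (q ≥ 2^64) cannot fire on Dom
def finite_field_order_prime_power_u64_py_alt (q : Int) : Int × Int :=
  if q < 2 then (0, 0)
  else
    let fm := pvFactOuter q.toNat q 2 []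
    let factors := if fm.2 > 1 then fm.1 ++ [(fm.2, 1)] else fm.1
    let g := pvGcdFold factors
    pvMainLoopB g factors (PySem.List.pyRange g 0 (-1))

-- ===== PRECONDITION & SPEC =====
-- Pre_ excludes q < 2 and q that are not prime powers: there both A and B normally raise
-- ValueError (ports return the non-value (0,0)) — except on rare composites whose every
-- candidate root fools the shared base-skipping Miller–Rabin helper (e.g. q = 4033), where A and
-- B both RETURN the identical value ((4033, 1)); those agreeing inputs are excluded only because
-- the set of such pseudoprimes has no closed form a reader could check without running the test.
def Pre_finite_field_order_prime_power_u64_py (q : Int) : Prop :=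
  2 ≤ q ∧ IsPrimePow q.toNat
instance (q : Int) : Decidable (Pre_finite_field_order_prime_power_u64_py q) := by
  unfold Pre_finite_field_order_prime_power_u64_py; infer_instance

def pvWitness_finite_field_order_prime_power_u64_py : Int := 8

def Spec_finite_field_order_prime_power_u64_py (q : Int) (out : Int × Int) : Prop :=
  out = finite_field_order_prime_power_u64_py_alt q
instance (q : Int) (out : Int × Int) : Decidable (Spec_finite_field_order_prime_power_u64_py q out) := by
  unfold Spec_finite_field_order_prime_power_u64_py; infer_instance

-- ===== CLAIM (what is proved, stated in full; the proofs are below) =====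
def Claim_equal_finite_field_order_prime_power_u64_py : Prop :=
  ∀ (q : Int), Dom_finite_field_order_prime_power_u64_py q →
    Pre_finite_field_order_prime_power_u64_py q →
    Spec_finite_field_order_prime_power_u64_py q (finite_field_order_prime_power_u64_py q)

-- ===== LEMMAS AND PROOFS =====

-- ---- B side: trial division factors p^f as [(p, f)], gcd gives f, the scan accepts f ----

theorem pyRange_down_cons (m : Int) (h : 1 ≤ m) :
    PySem.List.pyRange m 0 (-1) = m :: PySem.List.pyRange (m - 1) 0 (-1) := by
  unfold PySem.List.pyRange
  norm_num
  rw [if_pos (by omega : 0 < m)]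
  rcases eq_or_lt_of_le h with h1 | h1
  · rw [if_neg (by omega)]
    simp [← h1]
  · rw [if_pos (by omega)]
    have e1 : m.toNat = (m.toNat - 1) + 1 := by omega
    rw [e1, List.range_succ_eq_map]
    simp only [List.map_cons, List.map_map, Function.comp_def, Nat.cast_zero, add_zero, neg_zero]
    congr 1
    apply List.map_congr_left
    intro a _; push_cast; ring

theorem pvDivOut_eq {p : ℕ} (hp : 2 ≤ p) (f : ℕ) (fuel : ℕ) (a : Int) (hfuel : f ≤ fuel) :
    pvDivOut fuel (p : Int) ((p : Int) ^ f) a = (1, a + (f : Int)) := by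
  induction f generalizing fuel a with
  | zero =>
    have hstop : ∀ g : ℕ, pvDivOut g (p : Int) 1 a = (1, a) := by
      intro g
      cases g with
      | zero => rfl
      | succ g =>
        simp only [pvDivOut]
        rw [if_neg (by
          rw [PySem.Int.mod_eq_zero_iff_dvd]
          intro hdvd
          have := Int.le_of_dvd (by norm_num) hdvd
          omega)]
    simpa using hstop fuel
  | succ f ih =>
    obtain ⟨g, rfl⟩ : ∃ g, fuel = g + 1 := ⟨fuel - 1, by omega⟩
    simp only [pvDivOut]
    rw [if_pos (by
      rw [PySem.Int.mod_eq_zero_iff_dvd]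
      exact ⟨(p:Int)^f, by ring⟩)]
    have e1 : PySem.Int.floordiv ((p:Int) ^ (f+1)) p = (p:Int) ^ f := by
      have h2 : ((p:Int))^(f+1) = (p:Int)^f * p := by ring
      rw [h2, PySem.Int.floordiv_eq_ediv_of_pos (by exact_mod_cast hp.trans_lt' (by norm_num))]
      exact Int.mul_ediv_cancel _ (by positivity)
    rw [e1, ih g (a + 1) (by omega)]
    push_cast; ring_nf

-- no d with 2 ≤ d < p divides p^f
theorem no_small_divisor {p : ℕ} (pp : p.Prime) (f : ℕ) (d : Int) (hd2 : 2 ≤ d)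
    (hdp : d < (p : Int)) : ¬ (d ∣ (p : Int) ^ f) := by
  intro hdvd
  have hdN : d.toNat ∣ p ^ f := by
    have h1 : (d.toNat : Int) ∣ ((p ^ f : ℕ) : Int) := by
      have : (d.toNat : Int) = d := by omega
      rw [this]; push_cast; exact hdvd
    exact_mod_cast h1
  have hq := Nat.minFac_prime (by omega : d.toNat ≠ 1)
  have hmf : (d.toNat).minFac ∣ p ^ f := dvd_trans (Nat.minFac_dvd _) hdN
  have hpp : (d.toNat).minFac = p :=
    (Nat.prime_dvd_prime_iff_eq hq pp).mp (Nat.Prime.dvd_of_dvd_pow hq hmf)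
  have := Nat.minFac_le (by omega : 0 < d.toNat)
  omega

-- once m = 1 the outer loop stops whatever fuel is left
theorem pvFactOuter_one (fuel : ℕ) (d : Int) (acc : List (Int × Int)) (hd : 2 ≤ d) :
    pvFactOuter fuel 1 d acc = (acc, 1) := by
  cases fuel with
  | zero => rfl
  | succ fuel =>
    simp only [pvFactOuter]
    rw [if_neg (by nlinarith)]

-- the trial-division scan over p^f with no divisor below the current d
theorem pvFactOuter_eq {p f : ℕ} (pp : p.Prime) (hf : 1 ≤ f) (fuel : ℕ) (d : Int)
    (hd2 : 2 ≤ d) (hdp : d ≤ (p : Int)) (hodd : d = 2 ∨ d % 2 = 1) (acc : List (Int × Int))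
    (hfuel : ((p : Int) - d).toNat < fuel) :
    pvFactOuter fuel ((p : Int) ^ f) d acc =
      (if 2 ≤ f then (acc ++ [((p : Int), (f : Int))], 1) else (acc, (p : Int))) := by
  have hp2 : 2 ≤ p := pp.two_le
  have hpI : (2:Int) ≤ (p:Int) := by exact_mod_cast hp2
  have hpodd : p = 2 ∨ (p : Int) % 2 = 1 := by
    rcases Nat.Prime.eq_two_or_odd pp with h | h
    · exact Or.inl h
    · right; omega
  induction fuel generalizing d with
  | zero => omega
  | succ fuel ih =>
  simp only [pvFactOuter]
  rcases eq_or_lt_of_le hdp with heq | hlt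
  · -- d = p
    by_cases h2f : 2 ≤ f
    · rw [if_pos (by
        rw [heq]
        calc (p:Int) * (p:Int) = (p:Int) ^ 2 := by ring
          _ ≤ (p:Int) ^ f := pow_le_pow_right₀ (by omega) h2f)]
      rw [if_pos (by
        rw [PySem.Int.mod_eq_zero_iff_dvd, ← heq]
        exact dvd_pow_self _ (by omega : f ≠ 0))]
      have hfle : f ≤ ((p:Int) ^ f).toNat := by
        have h1 : f < 2 ^ f := Nat.lt_two_pow_self
        have h2 : (2:ℕ) ^ f ≤ p ^ f := Nat.pow_le_pow_left hp2 f
        have h3 : (((p ^ f : ℕ)) : Int) = (p:Int) ^ f := by push_cast; ring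
        omega
      rw [heq, pvDivOut_eq hp2 f _ 0 hfle]
      simp only [zero_add]
      rw [pvFactOuter_one fuel _ _ (by split_ifs <;> omega)]
      rw [if_pos h2f]
    · have hf1 : f = 1 := by omega
      rw [if_neg (by
        rw [heq, hf1, pow_one]
        nlinarith)]
      rw [if_neg (by omega), hf1, pow_one]
  · -- d < p : d never divides, advance
    by_cases hg : d * d ≤ (p:Int) ^ f
    · rw [if_pos hg]
      rw [if_neg (by
        rw [PySem.Int.mod_eq_zero_iff_dvd]
        exact no_small_divisor pp f d hd2 hlt)]
      set d' := (if d = 2 then d + 1 else d + 2) with hd'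
      have hd'2 : 2 ≤ d' := by split_ifs at hd' <;> omega
      have hd'p : d' ≤ (p : Int) := by
        rcases hodd with h2 | ho
        · have : d' = 3 := by rw [hd', if_pos h2]; omega
          omega
        · have hdne : d ≠ 2 := by omega
          have : d' = d + 2 := by rw [hd', if_neg hdne]
          rcases hpodd with hp2' | hpo
          · exfalso; rw [hp2'] at hlt; norm_num at hlt; omega
          · omega
      have hd'odd : d' = 2 ∨ d' % 2 = 1 := by
        right
        rcases hodd with h2 | ho
        · rw [hd', if_pos h2]; omega
        · rw [hd', if_neg (by omega)]; omega
      exact ih d' hd'2 hd'p hd'odd (by split_ifs at hd' <;> omega)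
    · rw [if_neg hg]
      have hf1 : ¬ 2 ≤ f := by
        intro h2f
        apply hg
        calc d * d ≤ (p:Int) * (p:Int) := by nlinarith
          _ = (p:Int) ^ 2 := by ring
          _ ≤ (p:Int) ^ f := pow_le_pow_right₀ (by omega) h2f
      rw [if_neg hf1]
      have : f = 1 := by omega
      rw [this, pow_one]

theorem pvGcdE_zero (e : Int) (he : 1 ≤ e) : pvGcdE (e.toNat + 1) 0 e = e := by
  have h0 : PySem.Int.mod 0 e = 0 := by
    rw [PySem.Int.mod_eq_emod_of_pos (by omega)]; simp
  simp only [pvGcdE, if_pos (by omega : (0:Int) < e), h0]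
  obtain ⟨k, hk⟩ : ∃ k, e.toNat = k + 1 := ⟨e.toNat - 1, by omega⟩
  rw [hk]
  simp [pvGcdE]

theorem alt_eq {p f : ℕ} (pp : p.Prime) (hf : 1 ≤ f)
    (hprime : pvIsPrime (p : Int) = true) :
    finite_field_order_prime_power_u64_py_alt ((p : Int) ^ f) = ((p : Int), (f : Int)) := by
  have hp2 : 2 ≤ p := pp.two_le
  have hpI : (2:Int) ≤ (p:Int) := by exact_mod_cast hp2
  have hq2 : 2 ≤ (p:Int) ^ f := by
    calc (2:Int) ≤ (p:Int) := hpI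
      _ = (p:Int) ^ 1 := (pow_one _).symm
      _ ≤ (p:Int) ^ f := pow_le_pow_right₀ (by omega) hf
  unfold finite_field_order_prime_power_u64_py_alt
  rw [if_neg (by omega)]
  rw [pvFactOuter_eq pp hf ((p:Int)^f).toNat 2 le_rfl hpI (Or.inl rfl) []
    (by have hps : (p:Int) ≤ (p:Int)^f := le_self_pow₀ (by omega) (by omega); omega)]
  by_cases h2f : 2 ≤ f
  · rw [if_pos h2f]
    simp only [List.nil_append]
    rw [if_neg (by norm_num)]
    have hg : pvGcdFold [((p:Int), (f:Int))] = (f : Int) := by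
      unfold pvGcdFold
      simp only [List.foldl_cons, List.foldl_nil]
      exact pvGcdE_zero _ (by exact_mod_cast hf)
    rw [hg]
    rw [pyRange_down_cons (f : Int) (by exact_mod_cast hf)]
    rw [pvMainLoopB]
    rw [if_neg (by
      simp only [not_not]
      rw [PySem.Int.mod_eq_zero_iff_dvd])]
    have hroot : pvRootProd [((p:Int), (f:Int))] (f : Int) = (p : Int) := by
      unfold pvRootProd
      simp only [List.foldl_cons, List.foldl_nil, one_mul]
      have : PySem.Int.floordiv (f : Int) (f : Int) = 1 := by
        rw [PySem.Int.floordiv_eq_ediv_of_pos (by exact_mod_cast hf)]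
        exact Int.ediv_self (by exact_mod_cast Nat.one_le_iff_ne_zero.mp hf)
      rw [this]
      norm_num
    simp [hroot, hprime]
  · rw [if_neg h2f]
    have hf1 : f = 1 := by omega
    subst hf1
    simp only [gt_iff_lt, List.nil_append, Nat.cast_one]
    rw [if_pos (by omega : (1:Int) < (p:Int))]
    have hg : pvGcdFold [((p:Int), (1:Int))] = (1 : Int) := by
      unfold pvGcdFold
      simp only [List.foldl_cons, List.foldl_nil]
      exact pvGcdE_zero 1 le_rfl
    rw [hg]
    rw [pyRange_down_cons 1 le_rfl]
    rw [pvMainLoopB]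
    rw [if_neg (by
      simp only [not_not]
      rw [PySem.Int.mod_eq_zero_iff_dvd])]
    have hroot : pvRootProd [((p:Int), (1:Int))] 1 = (p : Int) := by
      unfold pvRootProd
      simp only [List.foldl_cons, List.foldl_nil, one_mul]
      have h1 : PySem.Int.floordiv (1 : Int) 1 = 1 := by
        rw [PySem.Int.floordiv_eq_ediv_of_pos (by norm_num)]
        norm_num
      rw [h1]
      norm_num
    simp [hroot, hprime]

-- ---- A side: the binary search computes the floor k-th root ----

theorem pvRootLoop_spec (fuel : ℕ) (n k lo hi : Int) (_hk : 1 ≤ k) (hlo : 1 ≤ lo)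
    (hlh : lo ≤ hi) (h1 : lo ^ k.toNat ≤ n) (h2 : n < (hi + 1) ^ k.toNat)
    (hfuel : (hi - lo).toNat < fuel) :
    1 ≤ pvRootLoop fuel n k lo hi ∧ (pvRootLoop fuel n k lo hi) ^ k.toNat ≤ n ∧
      n < (pvRootLoop fuel n k lo hi + 1) ^ k.toNat := by
  induction fuel generalizing lo hi with
  | zero => omega
  | succ fuel ih =>
  simp only [pvRootLoop]
  by_cases hc : lo < hi
  · rw [if_pos hc]
    have hmid : lo + 1 ≤ PySem.Int.floordiv (lo + hi + 1) 2 ∧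
        PySem.Int.floordiv (lo + hi + 1) 2 ≤ hi := by
      rw [PySem.Int.floordiv_eq_ediv_of_pos (by omega)]
      omega
    set mid := PySem.Int.floordiv (lo + hi + 1) 2 with hmdef
    by_cases hp : mid ^ k.toNat ≤ n
    · rw [if_pos hp]
      exact ih mid hi (by omega) (by omega) hp h2 (by omega)
    · rw [if_neg hp]
      exact ih lo (mid - 1) hlo (by omega) h1
        (by have : mid - 1 + 1 = mid := by ring
            rw [this]; omega) (by omega)
  · rw [if_neg hc]
    have : lo = hi := by omega
    exact ⟨hlo, h1, by rw [this]; exact h2⟩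

theorem pvNthRootFloor_spec (n k : Int) (hn : 2 ≤ n) (hk : 2 ≤ k) :
    1 ≤ pvNthRootFloor n k ∧ (pvNthRootFloor n k) ^ k.toNat ≤ n ∧
      n < (pvNthRootFloor n k + 1) ^ k.toNat := by
  unfold pvNthRootFloor
  rw [if_neg (by omega), if_neg (by omega)]
  dsimp only
  set bl : Int := (PySem.Int.bitLength n : Int) with hbl
  set e : Int := PySem.Int.floordiv (bl + k - 1) k with he
  have hblnn : n.natAbs < 2 ^ PySem.Int.bitLength n := PySem.Int.lt_two_pow_bitLength n
  have hbl0 : 0 < bl := by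
    rcases Nat.eq_zero_or_pos (PySem.Int.bitLength n) with h0 | h0
    · rw [h0] at hblnn; simp at hblnn; omega
    · simp only [hbl]; exact_mod_cast h0
  have hek : bl ≤ e * k := by
    have h4 := PySem.Int.floordiv_mul_add_mod (bl + k - 1) k
    have h5 := PySem.Int.mod_nonneg (bl + k - 1) (by omega : (0:Int) < k)
    have h6 := PySem.Int.mod_lt (bl + k - 1) (by omega : (0:Int) < k)
    rw [← he] at h4
    omega
  have he0 : 0 ≤ e := by nlinarith
  have hhi : (1 : Int) <<< e.toNat = 2 ^ e.toNat := by simp [Int.shiftLeft_eq]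
  rw [hhi]
  have hhi1 : (1:Int) ≤ 2 ^ e.toNat := one_le_pow₀ (by omega)
  refine pvRootLoop_spec (((2:Int) ^ e.toNat).toNat + 1) (n := n) (k := k) 1 ((2:Int) ^ e.toNat)
    (by omega) le_rfl (by omega) (by simpa using (by omega : (1:Int) ≤ n)) ?_ (by omega)
  have hn2 : n < (2:Int) ^ bl.toNat := by
    have h8 : bl.toNat = PySem.Int.bitLength n := by simp [hbl]
    rw [h8]
    calc n ≤ (n.natAbs : Int) := by omega
      _ < ((2 ^ PySem.Int.bitLength n : ℕ) : Int) := by exact_mod_cast hblnn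
      _ = (2:Int) ^ PySem.Int.bitLength n := by push_cast; ring
  have hm : bl.toNat ≤ e.toNat * k.toNat := by
    have h9 : (e * k).toNat = e.toNat * k.toNat := Int.toNat_mul he0 (by omega : (0:Int) ≤ k)
    omega
  calc n < (2:Int) ^ bl.toNat := hn2
    _ ≤ (2:Int) ^ (e.toNat * k.toNat) := by
        apply pow_le_pow_right₀ (by omega) hm
    _ = ((2:Int) ^ e.toNat) ^ k.toNat := by rw [pow_mul]
    _ ≤ ((2:Int) ^ e.toNat + 1) ^ k.toNat := by
        apply pow_le_pow_left₀ (by positivity) (by omega)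

theorem root_unique (n k r s : Int) (_hk : 1 ≤ k) (hr : 0 ≤ r) (hs : 0 ≤ s)
    (h1 : r ^ k.toNat ≤ n) (h2 : n < (r + 1) ^ k.toNat)
    (h3 : s ^ k.toNat ≤ n) (h4 : n < (s + 1) ^ k.toNat) : r = s := by
  by_contra hne
  rcases lt_or_gt_of_ne hne with hlt | hlt
  · have : (r + 1) ^ k.toNat ≤ s ^ k.toNat := pow_le_pow_left₀ (by omega) (by omega) _
    omega
  · have : (s + 1) ^ k.toNat ≤ r ^ k.toNat := pow_le_pow_left₀ (by omega) (by omega) _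
    omega

-- q = p^f is not a perfect k-th power for any k > f
theorem no_high_power {p f : ℕ} (pp : p.Prime) (hf : 1 ≤ f) (r : Int) (hr : 1 ≤ r)
    (k : Int) (hk : (f : Int) < k) (he : r ^ k.toNat = (p : Int) ^ f) : False := by
  have hkn : f < k.toNat := by omega
  have heN : r.toNat ^ k.toNat = p ^ f := by
    have hr' : r = (r.toNat : Int) := by omega
    rw [hr'] at he
    exact_mod_cast he
  have hdvd : r.toNat ∣ p ^ f := heN ▸ dvd_pow_self r.toNat (by omega)
  obtain ⟨j, hj, hrj⟩ := (Nat.dvd_prime_pow pp).mp hdvd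
  rw [hrj, ← pow_mul] at heN
  have hjk : j * k.toNat = f := Nat.pow_right_injective pp.two_le heN
  rcases Nat.eq_zero_or_pos j with h0 | h0
  · subst h0; simp at hjk; omega
  · nlinarith

-- ---- A side: the deterministic Miller–Rabin test returns true on every prime ----

theorem pvSplit2_spec (fuel : ℕ) (d0 s0 : Int) (h : 0 < d0) (hfuel : d0.toNat ≤ fuel) :
    0 < (pvSplit2 fuel d0 s0).1 ∧ (pvSplit2 fuel d0 s0).1 % 2 = 1 ∧
      s0 ≤ (pvSplit2 fuel d0 s0).2 ∧
      (pvSplit2 fuel d0 s0).1 * 2 ^ ((pvSplit2 fuel d0 s0).2 - s0).toNat = d0 := by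
  induction fuel generalizing d0 s0 with
  | zero => omega
  | succ fuel ih =>
  simp only [pvSplit2]
  by_cases hc : PySem.Int.mod d0 2 = 0
  · rw [if_pos hc]
    rw [PySem.Int.mod_eq_emod_of_pos (by omega)] at hc
    rw [PySem.Int.floordiv_eq_ediv_of_pos (by omega)]
    have hd2 : 0 < d0 / 2 := by omega
    obtain ⟨h1, h2, h3, h4⟩ := ih (d0/2) (s0 + 1) hd2 (by omega)
    refine ⟨h1, h2, by omega, ?_⟩
    have he : ((pvSplit2 fuel (d0/2) (s0+1)).2 - s0).toNat =
        ((pvSplit2 fuel (d0/2) (s0+1)).2 - (s0+1)).toNat + 1 := by omega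
    rw [he, pow_succ, ← mul_assoc, h4]
    omega
  · rw [if_neg hc]
    rw [PySem.Int.mod_eq_emod_of_pos (by omega)] at hc
    simp
    omega

theorem emod_pow_emod (a n : Int) (b : Nat) : (a % n) ^ b % n = a ^ b % n := by
  induction b with
  | zero => simp
  | succ b ih =>
    rw [pow_succ, pow_succ, Int.mul_emod, ih, Int.emod_emod_of_dvd _ dvd_rfl, ← Int.mul_emod]

theorem pvPowMod_eq (b : Int) (e : Nat) (m : Int) (hm : 0 < m) :
    pvPowMod b e m = (b ^ e) % m := by
  induction e using Nat.strong_induction_on generalizing b with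
  | _ e ih =>
  rw [pvPowMod]
  by_cases h0 : e = 0
  · rw [dif_pos h0, h0, pow_zero, PySem.Int.mod_eq_emod_of_pos hm]
  · rw [dif_neg h0]
    have hbb : PySem.Int.mod (b * b) m = (b * b) % m := PySem.Int.mod_eq_emod_of_pos hm
    have hrec := ih (e / 2) (by omega) ((b * b) % m)
    rw [hbb, hrec]
    have hpow : ((b * b) % m) ^ (e / 2) % m = b ^ (2 * (e / 2)) % m := by
      rw [emod_pow_emod, two_mul, pow_add, ← mul_pow]
    by_cases hodd : e % 2 = 1
    · rw [if_pos hodd, hpow, PySem.Int.mod_eq_emod_of_pos hm]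
      calc (b ^ (2 * (e / 2)) % m * b) % m
          = (b ^ (2 * (e / 2)) * b) % m := by
            rw [Int.mul_emod, Int.emod_emod_of_dvd _ dvd_rfl, ← Int.mul_emod]
        _ = b ^ e % m := by
            rw [← pow_succ]
            have h2 : 2 * (e / 2) + 1 = e := by omega
            rw [h2]
    · rw [if_neg hodd, hpow]
      have h2 : 2 * (e / 2) = e := by omega
      rw [h2]

-- the squaring chain that the witness loop walks along (proof-side helper)
def pvIter (n x : Int) : Nat → Int
  | 0 => x
  | j + 1 => pvIter n (PySem.Int.mod (x * x) n) j

theorem pvWitnessLoop_false (n x : Int) (k j : Nat) (hj1 : 1 ≤ j) (hjk : j ≤ k)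
    (hx : pvIter n x j = n - 1) : pvWitnessLoop n x k = false := by
  induction k generalizing x j with
  | zero => omega
  | succ k ih =>
    rw [pvWitnessLoop]
    by_cases hc : PySem.Int.mod (x * x) n = n - 1
    · simp [hc]
    · simp only [if_neg hc]
      rcases Nat.lt_or_ge j 2 with h2 | h2
      · exfalso
        have : j = 1 := by omega
        rw [this] at hx
        exact hc hx
      · exact ih _ (j - 1) (by omega) (by omega) (by
          have : j = (j - 1) + 1 := by omega
          rw [this] at hx
          exact hx)

theorem pvIter_emod (n a : Int) (hn : 0 < n) (e : ℕ) (j : ℕ) :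
    pvIter n ((a ^ e) % n) j = (a ^ (e * 2 ^ j)) % n := by
  induction j generalizing e with
  | zero => simp [pvIter]
  | succ j ih =>
    rw [pvIter]
    have h1 : PySem.Int.mod ((a ^ e) % n * ((a ^ e) % n)) n = (a ^ (2 * e)) % n := by
      rw [PySem.Int.mod_eq_emod_of_pos hn, ← Int.mul_emod]
      rw [← pow_add]
      congr 1
      ring_nf
    rw [h1, ih (2 * e)]
    congr 1
    ring

theorem mr_chain {p : ℕ} [Fact p.Prime] (x : ZMod p) (t m : ℕ)
    (h : x ^ (t * 2 ^ m) = 1) : x ^ t = 1 ∨ ∃ j < m, x ^ (t * 2 ^ j) = -1 := by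
  induction m with
  | zero => left; simpa using h
  | succ m ih =>
    have hsq : x ^ (t * 2 ^ m) * x ^ (t * 2 ^ m) = 1 := by
      rw [← pow_add]
      rw [← h]
      congr 1
      ring
    rcases mul_self_eq_one_iff.mp hsq with h1 | h1
    · rcases ih h1 with h2 | ⟨j, hj, h2⟩
      · exact Or.inl h2
      · exact Or.inr ⟨j, by omega, h2⟩
    · exact Or.inr ⟨m, by omega, h1⟩

-- one Fermat/strong-probable-prime round never flags a true prime
theorem mr_base {p : ℕ} (pp : p.Prime) (hp5 : 5 ≤ p) (hpodd : p % 2 = 1)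
    (d s : Int) (hd : 0 < d) (hs : 1 ≤ s) (hds : d * 2 ^ s.toNat = (p : Int) - 1)
    (a : Int) (ha2 : 2 ≤ a) (hap : a < (p : Int)) :
    pvPowMod a d.toNat (p : Int) = 1 ∨
    pvPowMod a d.toNat (p : Int) = (p : Int) - 1 ∨
    pvWitnessLoop (p : Int) (pvPowMod a d.toNat (p : Int)) (s - 1).toNat = false := by
  haveI : Fact p.Prime := ⟨pp⟩
  have hpI : (0:Int) < (p:Int) := by exact_mod_cast pp.pos
  set t : ℕ := d.toNat with ht
  set s' : ℕ := s.toNat with hs'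
  have hx : pvPowMod a t (p:Int) = (a ^ t) % (p:Int) := pvPowMod_eq a t (p:Int) hpI
  have inj : ∀ y z : Int, 0 ≤ y → y < (p:Int) → 0 ≤ z → z < (p:Int) →
      ((y : ZMod p) = (z : ZMod p)) → y = z := by
    intro y z hy1 hy2 hz1 hz2 hyz
    have h0 : ((y - z : Int) : ZMod p) = 0 := by push_cast; rw [sub_eq_zero]; exact_mod_cast hyz
    have := (ZMod.intCast_zmod_eq_zero_iff_dvd _ _).mp h0
    rcases this with ⟨c, hc⟩
    rcases lt_trichotomy c 0 with h | h | h
    · nlinarith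
    · rw [h, mul_zero] at hc; omega
    · nlinarith
  set α : ZMod p := (a : ZMod p) with hα
  have hα0 : α ≠ 0 := by
    intro h0
    have := (ZMod.intCast_zmod_eq_zero_iff_dvd a p).mp h0
    have := Int.le_of_dvd (by omega) this
    omega
  have hexp : t * 2 ^ s' = p - 1 := by
    have : ((t * 2 ^ s' : ℕ) : Int) = ((p - 1 : ℕ) : Int) := by
      push_cast [Nat.cast_sub pp.pos]
      rw [← hds]
      congr 1
      omega
    exact_mod_cast this
  have hferm : α ^ (t * 2 ^ s') = 1 := by
    rw [hexp]
    exact ZMod.pow_card_sub_one_eq_one hα0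
  have hcastX : ∀ e : ℕ, (((a ^ e) % (p:Int) : Int) : ZMod p) = α ^ e := by
    intro e
    rw [ZMod.intCast_mod]
    push_cast
    rfl
  have hXbounds : ∀ e : ℕ, 0 ≤ (a ^ e) % (p:Int) ∧ (a ^ e) % (p:Int) < (p:Int) := by
    intro e
    exact ⟨Int.emod_nonneg _ (by omega), Int.emod_lt_of_pos _ hpI⟩
  have hm1cast : (((p:Int) - 1 : Int) : ZMod p) = -1 := by push_cast; simp
  rcases mr_chain α t s' hferm with h1 | ⟨j, hj, h1⟩
  · left
    rw [hx]
    apply inj _ _ (hXbounds t).1 (hXbounds t).2 (by omega) (by omega)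
    rw [hcastX t, h1]
    simp
  · have hXj : (a ^ (t * 2 ^ j)) % (p:Int) = (p:Int) - 1 := by
      apply inj _ _ (hXbounds _).1 (hXbounds _).2 (by omega) (by omega)
      rw [hcastX, h1, hm1cast]
    rcases Nat.eq_zero_or_pos j with hj0 | hj0
    · right; left
      rw [hx]
      rw [hj0] at hXj
      simpa using hXj
    · right; right
      rw [hx]
      apply pvWitnessLoop_false _ _ _ j hj0 (by omega)
      rw [pvIter_emod _ _ hpI t j, hXj]

theorem pvBasesLoop_true {p : ℕ} (pp : p.Prime) (hp5 : 5 ≤ p) (hpodd : p % 2 = 1)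
    (d s : Int) (hd : 0 < d) (hs : 1 ≤ s) (hds : d * 2 ^ s.toNat = (p : Int) - 1)
    (l : List Int) (hl : ∀ b ∈ l, 2 ≤ b) :
    pvBasesLoop (p : Int) d s l = true := by
  induction l with
  | nil => rfl
  | cons a rest ih =>
    rw [pvBasesLoop]
    by_cases hc : (p:Int) ≤ a
    · rw [if_pos hc]
      exact ih (fun b hb => hl b (by simp [hb]))
    · rw [if_neg hc]
      have ha2 : 2 ≤ a := hl a (by simp)
      rcases mr_base pp hp5 hpodd d s hd hs hds a ha2 (by omega) with h1 | h1 | h1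
      · rw [if_pos (Or.inl h1)]
        exact ih (fun b hb => hl b (by simp [hb]))
      · rw [if_pos (Or.inr h1)]
        exact ih (fun b hb => hl b (by simp [hb]))
      · by_cases h2 : pvPowMod a d.toNat (p:Int) = 1 ∨
            pvPowMod a d.toNat (p:Int) = (p:Int) - 1
        · rw [if_pos h2]
          exact ih (fun b hb => hl b (by simp [hb]))
        · rw [if_neg h2, h1, if_neg (by simp)]
          exact ih (fun b hb => hl b (by simp [hb]))

theorem pvIsPrime_of_prime {p : ℕ} (pp : p.Prime) : pvIsPrime (p : Int) = true := by
  have hp2 : 2 ≤ p := pp.two_le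
  unfold pvIsPrime
  rw [if_neg (by exact_mod_cast Nat.not_lt.mpr hp2)]
  by_cases h23 : p = 2 ∨ p = 3
  · rw [if_pos (by rcases h23 with h | h <;> subst h <;> norm_num)]
  · rw [if_neg (by
      push Not
      constructor <;> (intro hcon; apply h23)
      · left; exact_mod_cast hcon
      · right; exact_mod_cast hcon)]
    have hpodd : p % 2 = 1 := by
      rcases Nat.even_or_odd p with he | ho
      · exfalso
        have : p = 2 := (Nat.Prime.even_iff pp).mp he
        exact h23 (Or.inl this)
      · exact Nat.odd_iff.mp ho
    have hp5 : 5 ≤ p := by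
      rcases Nat.lt_or_ge p 5 with h | h
      · interval_cases p <;> omega
      · exact h
    rw [if_neg (by
      rw [PySem.Int.mod_eq_zero_iff_dvd]
      intro hdvd
      have : (2:ℕ) ∣ p := by exact_mod_cast hdvd
      omega)]
    obtain ⟨h1, h2, h3, h4⟩ := pvSplit2_spec ((p:Int) - 1).toNat ((p:Int) - 1) 0 (by omega) le_rfl
    set ds := pvSplit2 ((p:Int) - 1).toNat ((p:Int) - 1) 0 with hds
    have hsub : (ds.2 - 0).toNat = ds.2.toNat := by norm_num
    rw [hsub] at h4
    have hs1 : 1 ≤ ds.2 := by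
      rcases Nat.eq_zero_or_pos ds.2.toNat with h0 | h0
      · exfalso
        rw [h0, pow_zero, mul_one] at h4
        omega
      · omega
    apply pvBasesLoop_true pp hp5 hpodd ds.1 ds.2 h1 hs1 h4
    intro b hb
    fin_cases hb <;> norm_num

-- ---- A side: the descending exponent loop ----

theorem pvMainLoopA_eq {p f : ℕ} (pp : p.Prime) (hf : 1 ≤ f) (m : Int) (hm : (f : Int) ≤ m) :
    pvMainLoopA ((p : Int) ^ f) (PySem.List.pyRange m 0 (-1)) = ((p : Int), (f : Int)) := by
  have hp2 : 2 ≤ p := pp.two_le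
  have hpI : (2:Int) ≤ (p:Int) := by exact_mod_cast hp2
  have hq2 : 2 ≤ (p:Int) ^ f := by
    calc (2:Int) ≤ (p:Int) := hpI
      _ = (p:Int) ^ 1 := (pow_one _).symm
      _ ≤ (p:Int) ^ f := pow_le_pow_right₀ (by omega) hf
  induction hn : m.toNat using Nat.strong_induction_on generalizing m with
  | _ n ih =>
  rw [pyRange_down_cons m (by omega), pvMainLoopA]
  rcases eq_or_lt_of_le hm with heq | hlt
  · have hroot : pvNthRootFloor ((p:Int) ^ f) m = (p : Int) := by
      rcases eq_or_lt_of_le hf with hf1 | hf2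
      · have hm1 : m = 1 := by omega
        rw [hm1]
        unfold pvNthRootFloor
        rw [if_neg (by omega), if_pos rfl]
        rw [← hf1, pow_one]
      · obtain ⟨h1, h2, h3⟩ := pvNthRootFloor_spec ((p:Int) ^ f) m hq2 (by omega)
        have hmt : m.toNat = f := by omega
        refine root_unique ((p:Int)^f) m _ (p:Int) (by omega) (by omega) (by omega) h2 h3 ?_ ?_
        · rw [hmt]
        · rw [hmt]
          exact pow_lt_pow_left₀ (by omega) (by omega) (by omega)
    rw [hroot]
    rw [if_neg (by
      push Not
      rw [← heq]
      simp)]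
    rw [pvIsPrime_of_prime pp, if_pos rfl, ← heq]
  · obtain ⟨h1, h2, h3⟩ := pvNthRootFloor_spec ((p:Int) ^ f) m hq2 (by omega)
    rw [if_pos (by
      intro hcontra
      exact no_high_power pp hf _ h1 m hlt hcontra)]
    exact ih (m-1).toNat (by omega) (m - 1) (by omega) rfl

theorem a_eq {p f : ℕ} (pp : p.Prime) (hf : 1 ≤ f) :
    finite_field_order_prime_power_u64_py ((p : Int) ^ f) = ((p : Int), (f : Int)) := by
  have hp2 : 2 ≤ p := pp.two_le
  have hq2 : 2 ≤ (p:Int) ^ f := by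
    calc (2:Int) ≤ (p:Int) := by exact_mod_cast hp2
      _ = (p:Int) ^ 1 := (pow_one _).symm
      _ ≤ (p:Int) ^ f := pow_le_pow_right₀ (by exact_mod_cast hp2.trans_lt' (by norm_num)) hf
  unfold finite_field_order_prime_power_u64_py
  rw [if_neg (by omega)]
  apply pvMainLoopA_eq pp hf
  have h1 : 2 ^ f ≤ ((p:Int) ^ f).natAbs := by
    have : ((p:Int) ^ f).natAbs = p ^ f := by
      rw [← Nat.cast_pow, Int.natAbs_natCast]
    rw [this]
    exact Nat.pow_le_pow_left hp2 f
  have h2 := PySem.Int.lt_two_pow_bitLength ((p:Int) ^ f)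
  have h3 : f < PySem.Int.bitLength ((p:Int) ^ f) := by
    by_contra hcon
    have : 2 ^ PySem.Int.bitLength ((p:Int)^f) ≤ 2 ^ f := Nat.pow_le_pow_right (by omega) (by omega)
    omega
  omega

-- ===== VERDICT (by name: the statement is the Claim_ definition above) =====
theorem finite_field_order_prime_power_u64_py_spec :
    Claim_equal_finite_field_order_prime_power_u64_py := by
  intro q _hDom hPre
  obtain ⟨hq2, p, f, pp, hf, hq⟩ := hPre
  rw [← Nat.prime_iff] at pp
  have hq' : q = (p : Int) ^ f := by
    have : ((p ^ f : ℕ) : Int) = q := by rw [hq]; omega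
    push_cast at this; omega
  unfold Spec_finite_field_order_prime_power_u64_py
  rw [hq', a_eq pp hf, alt_eq pp hf (pvIsPrime_of_prime pp)]
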